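-- pv_equiv track=rewrite | github.com/Arselena/HS_Modul_6_Clean_code | Level_6_9_v1.py | Keymaker
-- ===== SOURCE A (Python) =====
-- def Keymaker(k:int):  # k - кол-во дверей
--     def open_close(Close_dors, step):
--         for i in range(step-1, len(Close_dors), step): # меняем положение дверей от n-1 с шагом n
--             if Close_dors[i] == False:
--                 Close_dors[i] = True
--             else:
--                 Close_dors[i] = False
--         return Close_dors
--
--     Close_dors = [True] * k # массив закрытых дверей
--     for i in range(1, k+1):
--         if i == 1:
--             Close_dors = [False] * k  # открываем все двери
--         else:
--             Close_dors = open_close(Close_dors, i)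
--
--     Close_dors = list(map(str, Close_dors))
--     Close_dors = ''.join(Close_dors)
--
--     return Close_dors
-- ===== SOURCE B (Python) =====
-- def Keymaker(k: int):
--     # Door j ends open ("False") iff j is a perfect square; walk 1..k
--     # tracking the next square incrementally (1, 4, 9, ... via odd gaps).
--     out = []
--     next_sq = 1
--     step = 3
--     for j in range(1, k + 1):
--         if j == next_sq:
--             out.append("False")
--             next_sq += step
--             step += 2
--         else:
--             out.append("True")
--     return ''.join(out)
-- ===== Notes on version B (the rewrite author's own statement) =====
-- stated objective: faster
-- what changed: Replaces the full door-toggling simulation (a pass for every divisor step) by a single left-to-right pass that marks exactly the perfect-square positions open, generating consecutive squares incrementally via odd gaps.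
import Mathlib
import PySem

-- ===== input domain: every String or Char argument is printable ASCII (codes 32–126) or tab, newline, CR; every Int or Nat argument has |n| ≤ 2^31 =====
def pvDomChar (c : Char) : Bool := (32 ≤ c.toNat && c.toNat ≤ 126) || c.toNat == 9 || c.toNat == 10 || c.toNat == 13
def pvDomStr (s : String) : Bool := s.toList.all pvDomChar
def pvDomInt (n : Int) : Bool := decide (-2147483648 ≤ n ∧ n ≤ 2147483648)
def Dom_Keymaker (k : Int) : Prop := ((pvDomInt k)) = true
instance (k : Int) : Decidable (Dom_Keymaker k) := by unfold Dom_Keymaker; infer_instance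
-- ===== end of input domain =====

-- B replaces A's full door-toggling simulation by a single pass that marks exactly
-- the perfect-square positions open, generating consecutive squares via odd gaps (faster).

-- ===== PORT A =====
-- one iteration of open_close's for-body: toggle Close_dors[i]
def pvToggleA (l : List Bool) (i : Int) : List Bool :=
  match PySem.List.pyGet? l i with
  | some b => l.set i.toNat (!b)   -- indices reached here satisfy 0 ≤ i < len, so toNat is exact
  | none => l

-- open_close(Close_dors, step)
def pvOpenCloseA (l : List Bool) (step : Int) : List Bool :=
  (PySem.List.pyRange (step - 1) (l.length : Int) step).foldl pvToggleA l

def Keymaker (k : Int) : String :=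
  String.join ((((PySem.List.pyRange 1 (k + 1) 1).foldl
      (fun acc i => if i = 1 then List.replicate k.toNat false else pvOpenCloseA acc i)
      (List.replicate k.toNat true)).map (fun b => if b then "True" else "False")))

-- ===== PORT B =====
-- one iteration of B's loop body over state (out, next_sq, step)
def pvStepB (st : List String × Int × Int) (j : Int) : List String × Int × Int :=
  if j = st.2.1 then (st.1 ++ ["False"], st.2.1 + st.2.2, st.2.2 + 2)
  else (st.1 ++ ["True"], st.2.1, st.2.2)

def Keymaker_alt (k : Int) : String :=
  String.join (((PySem.List.pyRange 1 (k + 1) 1).foldl pvStepB ([], 1, 3)).1)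

-- ===== PRECONDITION & SPEC =====
def Spec_Keymaker (k : Int) (out : String) : Prop := out = Keymaker_alt k
instance (k : Int) (out : String) : Decidable (Spec_Keymaker k out) := by unfold Spec_Keymaker; infer_instance

-- ===== CLAIM (what is proved, stated in full; the proofs are below) =====
def Claim_equal_Keymaker : Prop := ∀ (k : Int), Dom_Keymaker k → Spec_Keymaker k (Keymaker k)

-- ===== LEMMAS AND PROOFS =====

theorem pv_even_iff (n : Nat) : Even n ↔ ((n : ZMod 2) = 0) := ⟨fun h => ZMod.natCast_eq_zero_iff_even.2 h, fun h => ZMod.natCast_eq_zero_iff_even.1 h⟩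

theorem pv_card_zmod (s : Finset ℕ) : ((s.card : ZMod 2)) = ∑ _d ∈ s, (1 : ZMod 2) := by
  rw [Finset.card_eq_sum_ones]; push_cast; rfl

theorem pv_div_mem {j d : ℕ} (hj0 : j ≠ 0) (hd : d ∣ j) : j / d ∈ j.divisors := by
  rw [Nat.mem_divisors]
  exact ⟨Nat.div_dvd_of_dvd hd, hj0⟩

theorem pv_card_divisors_odd_iff (j : Nat) (hj : 1 ≤ j) :
    Odd j.divisors.card ↔ Nat.sqrt j * Nat.sqrt j = j := by
  have hj0 : j ≠ 0 := by omega
  rw [← Nat.exists_mul_self, ← Nat.not_even_iff_odd, pv_even_iff, pv_card_zmod]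
  constructor
  · intro hsum
    by_contra hne
    rw [not_exists] at hne
    apply hsum
    refine Finset.sum_involution (fun d _ => j / d) (fun a _ => by decide) ?_ ?_ ?_
    · intro d hd _
      rw [Nat.mem_divisors] at hd
      intro heq
      have heq' : j / d = d := heq
      have : d * d = j := by nth_rewrite 1 [← heq']; exact Nat.div_mul_cancel hd.1
      exact hne d this
    · intro d hd; rw [Nat.mem_divisors] at hd; exact pv_div_mem hj0 hd.1
    · intro d hd; rw [Nat.mem_divisors] at hd; exact Nat.div_div_self hd.1 hj0
  · rintro ⟨m, hm⟩ hsum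
    have hm0 : m ≠ 0 := by rintro rfl; simp at hm; omega
    have hmmem : m ∈ j.divisors := Nat.mem_divisors.2 ⟨⟨m, hm.symm⟩, hj0⟩
    have hjm : j / m = m := by rw [← hm]; exact Nat.mul_div_cancel_left m (Nat.pos_of_ne_zero hm0)
    have herase : (∑ _d ∈ j.divisors.erase m, (1 : ZMod 2)) = 0 := by
      refine Finset.sum_involution (fun d _ => j / d) (fun a _ => by decide) ?_ ?_ ?_
      · intro d hd _
        have hd' := Finset.mem_of_mem_erase hd
        rw [Nat.mem_divisors] at hd'
        intro heq
        have heq' : j / d = d := heq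
        have hdd : d * d = j := by nth_rewrite 1 [← heq']; exact Nat.div_mul_cancel hd'.1
        have : d = m := Nat.mul_self_inj.1 (hdd.trans hm.symm)
        exact (Finset.ne_of_mem_erase hd) this
      · intro d hd
        have hd' := Finset.mem_of_mem_erase hd
        rw [Nat.mem_divisors] at hd'
        refine Finset.mem_erase.2 ⟨?_, pv_div_mem hj0 hd'.1⟩
        intro heq
        have heq' : j / d = m := heq
        have : d = m := by
          calc d = j / (j / d) := (Nat.div_div_self hd'.1 hj0).symm
          _ = j / m := by rw [heq']
          _ = m := hjm
        exact (Finset.ne_of_mem_erase hd) this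
      · intro d hd
        have hd' := Finset.mem_of_mem_erase hd
        rw [Nat.mem_divisors] at hd'
        exact Nat.div_div_self hd'.1 hj0
    rw [← Finset.add_sum_erase _ _ hmmem, herase] at hsum
    simp at hsum

theorem pv_len_toggle (l : List Bool) (i : Int) : (pvToggleA l i).length = l.length := by
  unfold pvToggleA
  cases h : PySem.List.pyGet? l i <;> simp

theorem pv_len_foldToggle (idxs : List Int) (l : List Bool) :
    (idxs.foldl pvToggleA l).length = l.length := by
  induction idxs generalizing l with
  | nil => rfl
  | cons a t ih => rw [List.foldl_cons, ih, pv_len_toggle]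

-- pyGet? at a nonnegative in-range index
theorem pv_pyGet?_in (l : List Bool) (i : Int) (h0 : 0 ≤ i) (h1 : i < l.length) :
    PySem.List.pyGet? l i = l[i.toNat]? := by
  obtain ⟨n, rfl⟩ := Int.eq_ofNat_of_zero_le h0
  rw [PySem.List.pyGet?_natCast]
  simp

theorem pv_foldToggle (idxs : List Int) (l : List Bool)
    (hr : ∀ x ∈ idxs, 0 ≤ x ∧ x < (l.length : Int)) (hnd : idxs.Nodup)
    (i : Nat) (hi : i < l.length) :
    (idxs.foldl pvToggleA l)[i]? =
      if (i : Int) ∈ idxs then (l[i]?).map (fun b => !b) else l[i]? := by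
  induction idxs generalizing l with
  | nil => simp
  | cons a t ih =>
    obtain ⟨ha0, ha1⟩ := hr a List.mem_cons_self
    have hset : pvToggleA l a = l.set a.toNat (!(l.getD a.toNat false)) := by
      unfold pvToggleA
      rw [pv_pyGet?_in l a ha0 ha1]
      rw [List.getElem?_eq_getElem (by omega)]
      simp [List.getD, List.getElem?_eq_getElem (show a.toNat < l.length by omega)]
    rw [List.foldl_cons, ih (pvToggleA l a)
        (by intro x hx; have := hr x (List.mem_cons_of_mem _ hx); rwa [pv_len_toggle])
        hnd.of_cons (by rwa [pv_len_toggle])]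
    have hanat : a.toNat < l.length := by omega
    have hcast : ((i : Int) = a) ↔ (i = a.toNat) := by omega
    rw [hset]
    by_cases hia : i = a.toNat
    · have hmem : (i : Int) ∈ a :: t := by rw [List.mem_cons]; left; omega
      have hnmem : (i : Int) ∉ t := by
        intro hc; exact (List.nodup_cons.1 hnd).1 (by rwa [show a = (i:Int) by omega] )
      rw [if_neg hnmem, if_pos hmem, hia, List.getElem?_set_self hanat,
          List.getElem?_eq_getElem hanat]
      simp [List.getD, List.getElem?_eq_getElem hanat]
    · have hmemiff : (i:Int) ∈ a :: t ↔ (i:Int) ∈ t := by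
        rw [List.mem_cons]
        constructor
        · rintro (h | h); · omega
          · exact h
        · exact fun h => Or.inr h
      rw [List.getElem?_set_ne (by omega)]
      simp only [hmemiff]

theorem pv_nodup_pyRange_pos (a b s : Int) (hs : 0 < s) : (PySem.List.pyRange a b s).Nodup := by
  rw [PySem.List.pyRange_of_pos a b hs]
  refine List.Nodup.map ?_ (List.nodup_range)
  intro x y hxy
  have hb : a + s * (x : Int) = a + s * (y : Int) := hxy
  have hxy' : s * (x : Int) = s * y := by omega
  exact_mod_cast mul_left_cancel₀ (by omega : s ≠ 0) hxy' 

theorem pv_mem_pyRange_div (s : Int) (n i : Nat) (hs : 2 ≤ s) (hi : i < n) :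
    ((i : Int) ∈ PySem.List.pyRange (s - 1) (n : Int) s) ↔ (s ∣ (i : Int) + 1) := by
  rw [PySem.List.mem_pyRange_iff_of_pos (by omega)]
  constructor
  · rintro ⟨h1, h2, c, hc⟩
    exact ⟨c + 1, by linear_combination hc⟩
  · rintro ⟨c, hc⟩
    have hcpos : 1 ≤ c := by
      by_contra h
      have h0 : c ≤ 0 := by omega
      nlinarith
    refine ⟨by nlinarith, by omega, c - 1, by linear_combination hc⟩

theorem pv_openClose (l : List Bool) (s : Int) (hs : 2 ≤ s) (i : Nat) (hi : i < l.length) :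
    (pvOpenCloseA l s)[i]? =
      if s ∣ (i : Int) + 1 then (l[i]?).map (fun b => !b) else l[i]? := by
  unfold pvOpenCloseA
  rw [pv_foldToggle _ l ?_ (pv_nodup_pyRange_pos _ _ _ (by omega)) i hi]
  · simp only [pv_mem_pyRange_div s l.length i hs hi]
  · intro x hx
    rw [PySem.List.mem_pyRange_iff_of_pos (by omega)] at hx
    omega

theorem pv_len_openClose (l : List Bool) (s : Int) : (pvOpenCloseA l s).length = l.length :=
  pv_len_foldToggle _ _

theorem pv_len_foldOpen (ps : List Int) (l : List Bool) :
    (ps.foldl pvOpenCloseA l).length = l.length := by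
  induction ps generalizing l with
  | nil => rfl
  | cons a t ih => rw [List.foldl_cons, ih, pv_len_openClose]

theorem pvA_fold (n : Nat) (c : Nat) (i : Nat) (hi : i < n) :
    (((List.range' 2 c).map Int.ofNat).foldl pvOpenCloseA (List.replicate n false))[i]? =
      some (decide (Odd (((List.range' 2 c).filter (fun d => d ∣ (i+1))).length))) := by
  induction c with
  | zero => simp [hi, Nat.odd_iff]
  | succ m ih =>
    rw [List.range'_concat, List.map_append, List.foldl_append, List.filter_append]
    have hlen : (((List.range' 2 m).map Int.ofNat).foldl pvOpenCloseA (List.replicate n false)).length = n := by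
      rw [pv_len_foldOpen, List.length_replicate]
    simp only [List.map_cons, List.map_nil, List.foldl_cons, List.foldl_nil]
    rw [pv_openClose _ _ (by rw [Int.ofNat_eq_natCast]; push_cast; omega : (2:Int) ≤ Int.ofNat (2 + 1*m)) i (by rw [hlen]; exact hi)]
    rw [ih]
    have hdvd : ((Int.ofNat (2 + 1*m)) ∣ (i : Int) + 1) ↔ ((2 + 1*m) ∣ (i + 1)) := by
      rw [show ((i : Int) + 1) = ((i + 1 : Nat) : Int) from by push_cast; ring]
      exact Int.natCast_dvd_natCast
    by_cases hd : (2 + 1*m) ∣ (i + 1)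
    · rw [if_pos (hdvd.2 hd)]
      simp only [List.filter_cons, List.filter_nil]
      rw [decide_eq_true hd]
      simp only [List.length_append, List.length_cons, List.length_nil, if_pos trivial]
      simp [Nat.odd_add_one, ← Nat.not_even_iff_odd, decide_not]
    · rw [if_neg (fun h => hd (hdvd.1 h))]
      simp only [List.filter_cons, List.filter_nil]
      rw [decide_eq_false hd]
      simp


theorem pv_filter_card (n : Nat) (j : Nat) :
    ((Finset.Ico 2 (n+1)).filter (fun d => d ∣ j)).card
      = ((List.range' 2 (n-1)).filter (fun d => d ∣ j)).length := by
  rw [Nat.Ico_eq_range']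
  have : n + 1 - 2 = n - 1 := by omega
  rw [this]
  rfl

theorem pv_filter_eq_erase (n j : Nat) (h1 : 1 ≤ j) (h2 : j ≤ n) :
    (Finset.Ico 2 (n+1)).filter (fun d => d ∣ j) = j.divisors.erase 1 := by
  ext d
  rw [Finset.mem_filter, Finset.mem_Ico, Finset.mem_erase, Nat.mem_divisors]
  constructor
  · rintro ⟨⟨hd2, _⟩, hdvd⟩
    exact ⟨by omega, hdvd, by omega⟩
  · rintro ⟨hne, hdvd, _⟩
    have hd0 : d ≠ 0 := by rintro rfl; rw [Nat.zero_dvd] at hdvd; omega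
    have hdj : d ≤ j := Nat.le_of_dvd (by omega) hdvd
    exact ⟨⟨by omega, by omega⟩, hdvd⟩

theorem pv_count (n j : Nat) (h1 : 1 ≤ j) (h2 : j ≤ n) :
    Odd (((List.range' 2 (n-1)).filter (fun d => d ∣ j)).length)
      ↔ ¬ (Nat.sqrt j * Nat.sqrt j = j) := by
  rw [← pv_filter_card, pv_filter_eq_erase n j h1 h2,
      Finset.card_erase_of_mem (Nat.one_mem_divisors.2 (by omega))]
  have hcard : 1 ≤ j.divisors.card :=
    Finset.card_pos.2 ⟨1, Nat.one_mem_divisors.2 (by omega)⟩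
  rw [← pv_card_divisors_odd_iff j h1]
  rw [Nat.odd_iff, Nat.odd_iff]
  omega


def pvDoorStr (j : Nat) : String := if Nat.sqrt j * Nat.sqrt j = j then "False" else "True"

theorem pv_not_sq {a m : Nat} (h1 : (m-1)*(m-1) < a) (h2 : a < m*m) : ¬ (Nat.sqrt a * Nat.sqrt a = a) := by
  intro h
  have hlt : Nat.sqrt a < m := by
    by_contra hge
    push Not at hge
    nlinarith [Nat.mul_le_mul hge hge]
  have hgt : m - 1 < Nat.sqrt a := by
    by_contra hle
    push Not at hle
    nlinarith [Nat.mul_le_mul hle hle]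
  omega

theorem pvB_fold (len : Nat) : ∀ (a m : Nat) (out : List String), 1 ≤ m →
    (m-1)*(m-1) < a → a ≤ m*m →
    (((List.range' a len).map Int.ofNat).foldl pvStepB
        (out, ((m*m : Nat) : Int), ((2*m+1 : Nat) : Int))).1
    = out ++ (List.range' a len).map pvDoorStr := by
  induction len with
  | zero => intro a m out _ _ _; simp
  | succ n ih =>
    intro a m out hm h1 h2
    rw [List.range'_succ, List.map_cons, List.foldl_cons]
    by_cases he : a = m*m
    · have : pvStepB (out, ((m*m : Nat) : Int), ((2*m+1 : Nat) : Int)) (Int.ofNat a)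
          = (out ++ ["False"], (((m+1)*(m+1) : Nat) : Int), ((2*(m+1)+1 : Nat) : Int)) := by
        simp only [pvStepB]
        rw [show (Int.ofNat a) = ((m*m : Nat) : Int) from by rw [he]; simp, if_pos rfl]
        refine Prod.ext rfl (Prod.ext (by push_cast; ring) (by push_cast; ring))
      rw [this, ih (a+1) (m+1) (out ++ ["False"]) (by omega) (by simpa using by omega : (m+1-1)*(m+1-1) < a+1) (by nlinarith)]
      have hd : pvDoorStr a = "False" := by
        simp [pvDoorStr, he]
      simp [hd]
    · have hlt : a < m*m := by omega
      have : pvStepB (out, ((m*m : Nat) : Int), ((2*m+1 : Nat) : Int)) (Int.ofNat a)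
          = (out ++ ["True"], ((m*m : Nat) : Int), ((2*m+1 : Nat) : Int)) := by
        simp only [pvStepB]
        rw [if_neg (by simp; exact_mod_cast he)]
      rw [this, ih (a+1) m (out ++ ["True"]) hm (by omega) (by omega)]
      have hd : pvDoorStr a = "True" := by
        simp [pvDoorStr, pv_not_sq h1 hlt]
      simp [hd]


theorem pv_range_cast (a : Int) (len : Nat) (ha : 0 ≤ a) :
    (List.range len).map (fun t : Nat => a + (t : Int)) = (List.range' a.toNat len).map Int.ofNat := by
  rw [List.range'_eq_map_range, List.map_map]
  apply List.map_congr_left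
  intro x _
  simp only [Function.comp, Int.ofNat_eq_natCast]
  push_cast
  omega

theorem pvB_list (k : Int) (hk : 1 ≤ k) :
    ((PySem.List.pyRange 1 (k + 1) 1).foldl pvStepB ([], 1, 3)).1
    = (List.range' 1 k.toNat).map pvDoorStr := by
  have h1 : PySem.List.pyRange 1 (k+1) 1 = (List.range' 1 k.toNat).map Int.ofNat := by
    rw [PySem.List.pyRange_one, show (k + 1 - 1).toNat = k.toNat from by omega,
        pv_range_cast 1 k.toNat (by omega)]
    rfl
  rw [h1]
  have h2 := pvB_fold k.toNat 1 1 [] (by omega) (by omega) (by omega)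
  simpa using h2

theorem pvA_list (k : Int) (hk : 1 ≤ k) :
    (PySem.List.pyRange 1 (k + 1) 1).foldl
      (fun acc i => if i = 1 then List.replicate k.toNat false else pvOpenCloseA acc i)
      (List.replicate k.toNat true)
    = (List.range' 1 k.toNat).map (fun j => !(decide (Nat.sqrt j * Nat.sqrt j = j))) := by
  have hn : 1 ≤ k.toNat := by omega
  rw [PySem.List.pyRange_one_cons (by omega : (1:Int) < k + 1), List.foldl_cons, if_pos rfl,
      show (1:Int) + 1 = 2 from by norm_num]
  have hcongr : (PySem.List.pyRange 2 (k+1) 1).foldl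
      (fun acc i => if i = 1 then List.replicate k.toNat false else pvOpenCloseA acc i)
      (List.replicate k.toNat false)
      = (PySem.List.pyRange 2 (k+1) 1).foldl pvOpenCloseA (List.replicate k.toNat false) := by
    apply PySem.List.foldl_congr_mem
    intro acc x hx
    rw [PySem.List.mem_pyRange_one] at hx
    rw [if_neg (by omega)]
  rw [hcongr]
  have h2 : PySem.List.pyRange 2 (k+1) 1 = (List.range' 2 (k.toNat - 1)).map Int.ofNat := by
    rw [PySem.List.pyRange_one, show (k + 1 - 2).toNat = k.toNat - 1 from by omega,
        pv_range_cast 2 (k.toNat - 1) (by omega)]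
    rfl
  rw [h2]
  apply List.ext_getElem?
  intro i
  by_cases hi : i < k.toNat
  · rw [pvA_fold k.toNat (k.toNat - 1) i hi]
    rw [List.getElem?_map, List.getElem?_range' (by omega)]
    simp only [Option.map_some]
    congr 1
    rw [show 1 + 1*i = i + 1 from by omega]
    have hiff := pv_count k.toNat (i+1) (by omega) (by omega)
    by_cases hq : Nat.sqrt (i+1) * Nat.sqrt (i+1) = i+1
    · have hno : ¬ Odd ((List.filter (fun d => d ∣ i + 1) (List.range' 2 (k.toNat - 1))).length) := by
        rw [hiff]; simp [hq]
      rw [decide_eq_false hno, decide_eq_true hq]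
      rfl
    · have hyes : Odd ((List.filter (fun d => d ∣ i + 1) (List.range' 2 (k.toNat - 1))).length) :=
        hiff.2 hq
      rw [decide_eq_true hyes, decide_eq_false hq]
      rfl
  · have hL : (List.foldl pvOpenCloseA (List.replicate k.toNat false)
        ((List.range' 2 (k.toNat - 1)).map Int.ofNat)).length = k.toNat := by
      rw [pv_len_foldOpen, List.length_replicate]
    rw [List.getElem?_eq_none (by rw [hL]; omega),
        List.getElem?_eq_none (by rw [List.length_map, List.length_range']; omega)]

-- ===== VERDICT (by name: the statement is the Claim_ definition above) =====
theorem Keymaker_spec : Claim_equal_Keymaker := by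
  intro k _
  unfold Spec_Keymaker Keymaker Keymaker_alt
  by_cases hk : 1 ≤ k
  · rw [pvA_list k hk, pvB_list k hk, List.map_map]
    congr 1
    apply List.map_congr_left
    intro j _
    by_cases h : Nat.sqrt j * Nat.sqrt j = j <;> simp [pvDoorStr, h]
  · rw [PySem.List.pyRange_one_eq_nil (by omega)]
    have h0 : k.toNat = 0 := by omega
    simp [h0]
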